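-- pv_equiv track=rewrite | github.com/mvysotskyi/agents-benchmarking | evaluation/llm_judge/llm_as_judge.py | normalize_block_scalar
-- ===== SOURCE A (Python) =====
-- def normalize_block_scalar(lines: list[str], style: str) -> str:
--     if style.startswith("|"):
--         return "\n".join(lines).strip()
--
--     paragraphs: list[str] = []
--     current: list[str] = []
--     for line in lines:
--         if line.strip():
--             current.append(line.strip())
--             continue
--         if current:
--             paragraphs.append(" ".join(current).strip())
--             current = []
--         if paragraphs and paragraphs[-1] != "":
--             paragraphs.append("")
--     if current:
--         paragraphs.append(" ".join(current).strip())
--     return "\n".join(paragraphs).strip()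
-- ===== SOURCE B (Python) =====
-- def normalize_block_scalar(lines: list[str], style: str) -> str:
--     if style.startswith("|"):
--         return "\n".join(lines).strip()
--
--     paragraphs: list[str] = []
--     i, n = 0, len(lines)
--     while i < n:
--         first = lines[i].strip()
--         i += 1
--         if not first:
--             continue
--         run = [first]
--         while i < n and lines[i].strip():
--             run.append(lines[i].strip())
--             i += 1
--         paragraphs.append(" ".join(run))
--     return "\n\n".join(paragraphs)
-- ===== Notes on version B (the rewrite author's own statement) =====
-- stated objective: alternative
-- what changed: Replaced A's accumulator that interleaves empty-string markers into the paragraph list (plus a final '\n'.join(...).strip() to erase the trailing marker) by a direct run-partition: scan the lines once, collect each maximal run of non-blank lines as one space-joined paragraph, and join the paragraphs with '\n\n' with no sentinel entries and no final strip.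
import Mathlib
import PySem

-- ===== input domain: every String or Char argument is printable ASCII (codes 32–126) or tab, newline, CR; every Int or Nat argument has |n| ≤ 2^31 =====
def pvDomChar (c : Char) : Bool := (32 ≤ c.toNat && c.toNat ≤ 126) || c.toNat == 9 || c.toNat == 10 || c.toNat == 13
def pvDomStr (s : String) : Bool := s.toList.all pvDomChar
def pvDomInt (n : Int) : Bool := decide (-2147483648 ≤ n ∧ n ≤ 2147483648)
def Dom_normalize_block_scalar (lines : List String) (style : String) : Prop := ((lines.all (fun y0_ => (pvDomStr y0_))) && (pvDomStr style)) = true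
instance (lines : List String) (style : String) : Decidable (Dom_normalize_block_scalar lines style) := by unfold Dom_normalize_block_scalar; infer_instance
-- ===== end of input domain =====

-- B replaces A's accumulator-plus-blank-marker pass (and its final strip) by a direct
-- run-partition of the lines into non-blank runs joined with "\n\n" (objective: alternative).

-- ===== PORT A =====
-- the body of A's `for line in lines` loop
def nbsStep (acc : List String × List String) (line : String) : List String × List String :=
  if PySem.Str.strip line ≠ "" then
    (acc.1, acc.2 ++ [PySem.Str.strip line])
  else
    let ps := if acc.2 ≠ [] then acc.1 ++ [PySem.Str.strip (PySem.Str.join " " acc.2)] else acc.1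
    (if ps ≠ [] ∧ ps.getLast? ≠ some "" then ps ++ [""] else ps, [])

-- the final flush of `current` and the last `"\n".join(paragraphs).strip()`
def nbsFinish (st : List String × List String) : String :=
  PySem.Str.strip (PySem.Str.join "\n"
    (if st.2 ≠ [] then st.1 ++ [PySem.Str.strip (PySem.Str.join " " st.2)] else st.1))

def normalize_block_scalar (lines : List String) (style : String) : String :=
  if PySem.Str.startswith style "|" then
    PySem.Str.strip (PySem.Str.join "\n" lines)
  else
    nbsFinish (lines.foldl nbsStep ([], []))

-- ===== PORT B =====
-- B's inner while-loop: collect the stripped run of non-blank lines and the remainder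
def nbsTakeRun : List String → List String × List String
  | [] => ([], [])
  | l :: rest =>
    if PySem.Str.strip l ≠ "" then
      ((PySem.Str.strip l) :: (nbsTakeRun rest).1, (nbsTakeRun rest).2)
    else ([], l :: rest)

-- termination measure for the outer loop (cited by nbsParagraphs)
theorem nbsTakeRun_len (l : List String) : (nbsTakeRun l).2.length ≤ l.length := by
  induction l with
  | nil => simp [nbsTakeRun]
  | cons a t ih =>
    by_cases h : PySem.Str.strip a ≠ ""
    · simp only [nbsTakeRun, if_pos h]; exact Nat.le_succ_of_le ih
    · simp only [nbsTakeRun, if_neg h]; exact Nat.le_refl _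

-- B's outer while-loop: one paragraph per run of non-blank lines
def nbsParagraphs : List String → List String
  | [] => []
  | l :: rest =>
    if PySem.Str.strip l ≠ "" then
      PySem.Str.join " " ((PySem.Str.strip l) :: (nbsTakeRun rest).1)
        :: nbsParagraphs (nbsTakeRun rest).2
    else nbsParagraphs rest
  termination_by l => l.length
  decreasing_by
    · exact Nat.lt_succ_of_le (nbsTakeRun_len rest)
    · exact Nat.lt_succ_self _

def normalize_block_scalar_alt (lines : List String) (style : String) : String :=
  if PySem.Str.startswith style "|" then
    PySem.Str.strip (PySem.Str.join "\n" lines)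
  else
    PySem.Str.join "\n\n" (nbsParagraphs lines)

-- ===== PRECONDITION & SPEC =====
def Spec_normalize_block_scalar (lines : List String) (style : String) (out : String) : Prop := out = normalize_block_scalar_alt lines style
instance (lines : List String) (style : String) (out : String) : Decidable (Spec_normalize_block_scalar lines style out) := by unfold Spec_normalize_block_scalar; infer_instance

-- ===== CLAIM (what is proved, stated in full; the proofs are below) =====
def Claim_equal_normalize_block_scalar : Prop := ∀ (lines : List String) (style : String), Dom_normalize_block_scalar lines style → Spec_normalize_block_scalar lines style (normalize_block_scalar lines style)

-- ===== LEMMAS AND PROOFS =====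

-- a char list with a non-space first and last character (so strip fixes it)
def goodC (cs : List Char) : Prop :=
  (∃ c, cs.head? = some c ∧ PySem.Chars.isspace c = false) ∧
  (∃ c, cs.getLast? = some c ∧ PySem.Chars.isspace c = false)

def goodS (s : String) : Prop := goodC s.toList

-- A's paragraph list between blanks: P interleaved with "" separators
def sepsS : List String → List String
  | [] => []
  | [a] => [a]
  | a :: b :: t => a :: "" :: sepsS (b :: t)

def sepsC : List (List Char) → List (List Char)
  | [] => []
  | [a] => [a]
  | a :: b :: t => a :: [] :: sepsC (b :: t)

-- the shape of A's `paragraphs` list during the loop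
def interP (P : List String) : List String := sepsS P ++ if P = [] then [] else [""]

-- B's continuation: paragraphs still to be produced given pending run `cur` and remaining lines
def paraCont (cur rest : List String) : List String :=
  if cur = [] then nbsParagraphs rest
  else PySem.Str.join " " (cur ++ (nbsTakeRun rest).1) :: nbsParagraphs (nbsTakeRun rest).2

theorem dropWhile_head_false {p : Char → Bool} {l : List Char} {c : Char} {t : List Char}
    (h : List.dropWhile p l = c :: t) : p c = false := by
  induction l with
  | nil => simp at h
  | cons a l ih =>
    rw [List.dropWhile_cons] at h
    split at h
    · exact ih h
    · next hp => cases h; simpa using hp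

theorem rstrip_getLast {l : List Char} (h : PySem.Chars.rstrip l ≠ []) :
    ∃ c, (PySem.Chars.rstrip l).getLast? = some c ∧ PySem.Chars.isspace c = false := by
  rcases hd : List.dropWhile PySem.Chars.isspace l.reverse with _ | ⟨c, t⟩
  · exact absurd (by simp [PySem.Chars.rstrip, hd]) h
  · exact ⟨c, by simp [PySem.Chars.rstrip, hd, List.getLast?_reverse], dropWhile_head_false hd⟩

theorem lstrip_head {l : List Char} (h : PySem.Chars.lstrip l ≠ []) :
    ∃ c, (PySem.Chars.lstrip l).head? = some c ∧ PySem.Chars.isspace c = false := by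
  rcases hd : List.dropWhile PySem.Chars.isspace l with _ | ⟨c, t⟩
  · exact absurd (by simp [PySem.Chars.lstrip, hd]) h
  · exact ⟨c, by simp [PySem.Chars.lstrip, hd], dropWhile_head_false hd⟩

theorem rstrip_head? {l : List Char} (h : PySem.Chars.rstrip l ≠ []) :
    (PySem.Chars.rstrip l).head? = l.head? := by
  have hsuf : List.dropWhile PySem.Chars.isspace l.reverse <:+ l.reverse :=
    List.dropWhile_suffix _
  have hpre : PySem.Chars.rstrip l <+: l := by
    obtain ⟨t, ht⟩ := hsuf
    refine ⟨t.reverse, ?_⟩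
    have := congrArg List.reverse ht
    simpa [PySem.Chars.rstrip] using this
  obtain ⟨t, ht⟩ := hpre
  rcases hr : PySem.Chars.rstrip l with _ | ⟨c, cs⟩
  · exact absurd hr h
  · rw [hr] at ht; rw [← ht]; simp

theorem strip_good (cs : List Char) :
    PySem.Chars.strip cs = [] ∨ goodC (PySem.Chars.strip cs) := by
  by_cases h : PySem.Chars.strip cs = []
  · exact Or.inl h
  · right
    have hne : PySem.Chars.rstrip (PySem.Chars.lstrip cs) ≠ [] := by
      simpa [PySem.Chars.strip] using h
    have hls : PySem.Chars.lstrip cs ≠ [] := by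
      intro e; apply hne; rw [e]; rfl
    constructor
    · obtain ⟨c, hc, hcs⟩ := lstrip_head hls
      refine ⟨c, ?_, hcs⟩
      rw [show PySem.Chars.strip cs = PySem.Chars.rstrip (PySem.Chars.lstrip cs) from rfl,
        rstrip_head? hne, hc]
    · obtain ⟨c, hc, hcs⟩ := rstrip_getLast hne
      exact ⟨c, hc, hcs⟩

theorem good_strip_id {cs : List Char} (h : goodC cs) : PySem.Chars.strip cs = cs := by
  obtain ⟨⟨c1, h1, s1⟩, ⟨c2, h2, s2⟩⟩ := h
  have hls : PySem.Chars.lstrip cs = cs := by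
    rcases cs with _ | ⟨a, t⟩
    · rfl
    · have ha : a = c1 := by simpa using h1
      subst ha
      simp [PySem.Chars.lstrip, s1]
  have hrs : PySem.Chars.rstrip cs = cs := by
    rcases hrv : cs.reverse with _ | ⟨a, t⟩
    · have : cs = [] := by simpa using congrArg List.reverse hrv
      subst this; rfl
    · have ha : a = c2 := by
        have hh : cs.reverse.head? = some a := by rw [hrv]; rfl
        rw [List.head?_reverse, h2] at hh
        exact (Option.some_inj.mp hh).symm
      subst ha
      have : List.dropWhile PySem.Chars.isspace cs.reverse = cs.reverse := by
        rw [hrv, List.dropWhile_cons, s2]; simp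
      simp [PySem.Chars.rstrip, this]
  show PySem.Chars.rstrip (PySem.Chars.lstrip cs) = cs
  rw [hls, hrs]

theorem good_append {p q : List Char} (sep : List Char) (hp : goodC p) (hq : goodC q) :
    goodC (p ++ sep ++ q) := by
  obtain ⟨⟨c1, h1, s1⟩, _⟩ := hp
  obtain ⟨_, ⟨c2, h2, s2⟩⟩ := hq
  have hpne : p ≠ [] := by intro e; subst e; simp at h1
  have hqne : q ≠ [] := by intro e; subst e; simp at h2
  constructor
  · refine ⟨c1, ?_, s1⟩
    rw [List.head?_append_of_ne_nil _ (by simp [hpne] : p ++ sep ≠ []),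
      List.head?_append_of_ne_nil _ hpne, h1]
  · refine ⟨c2, ?_, s2⟩
    rw [List.getLast?_append_of_ne_nil _ hqne, h2]

theorem join_good (sep : List Char) (Qc : List (List Char)) (hne : Qc ≠ [])
    (h : ∀ q ∈ Qc, goodC q) : goodC (PySem.Chars.join sep Qc) := by
  induction Qc with
  | nil => simp at hne
  | cons a t ih =>
    rcases t with _ | ⟨b, t'⟩
    · simpa [PySem.Chars.join_singleton] using h a (by simp)
    · rw [PySem.Chars.join_cons_cons]
      exact good_append sep (h a (by simp)) (ih (by simp) (fun q hq => h q (by simp [hq])))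

theorem rstrip_concat_space {l : List Char} {c : Char} (hc : PySem.Chars.isspace c = true) :
    PySem.Chars.rstrip (l ++ [c]) = PySem.Chars.rstrip l := by
  simp [PySem.Chars.rstrip, hc]

theorem strip_concat_newline (l : List Char) :
    PySem.Chars.strip (l ++ ['\n']) = PySem.Chars.strip l := by
  show PySem.Chars.rstrip (PySem.Chars.lstrip (l ++ ['\n']))
      = PySem.Chars.rstrip (PySem.Chars.lstrip l)
  unfold PySem.Chars.lstrip
  rw [List.dropWhile_append]
  split
  · next he =>
    have h2 : List.dropWhile PySem.Chars.isspace l = [] := by simpa using he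
    rw [h2]
    have h1 : List.dropWhile PySem.Chars.isspace ['\n'] = [] := by decide
    rw [h1]
  · exact rstrip_concat_space (by decide)

theorem sepsC_cons_head (b : List Char) (t : List (List Char)) :
    ∃ S, sepsC (b :: t) = b :: S := by
  rcases t with _ | ⟨c, t'⟩
  · exact ⟨[], rfl⟩
  · exact ⟨[] :: sepsC (c :: t'), rfl⟩

theorem join_seps (Qc : List (List Char)) :
    PySem.Chars.join ['\n'] (sepsC Qc) = PySem.Chars.join ['\n', '\n'] Qc := by
  induction Qc with
  | nil => rfl
  | cons a t ih =>
    rcases t with _ | ⟨b, t'⟩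
    · rfl
    · obtain ⟨S, hS⟩ := sepsC_cons_head b t'
      show PySem.Chars.join ['\n'] (a :: [] :: sepsC (b :: t')) = _
      rw [hS, PySem.Chars.join_cons_cons, PySem.Chars.join_cons_cons, ← hS, ih,
        PySem.Chars.join_cons_cons]
      simp

theorem join_concat_nil (L : List (List Char)) (h : L ≠ []) :
    PySem.Chars.join ['\n'] (L ++ [[]]) = PySem.Chars.join ['\n'] L ++ ['\n'] := by
  induction L with
  | nil => simp at h
  | cons a t ih =>
    rcases t with _ | ⟨b, t'⟩
    · show PySem.Chars.join ['\n'] [a, []] = _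
      rw [PySem.Chars.join_cons_cons, PySem.Chars.join_singleton, PySem.Chars.join_singleton]
      simp
    · show PySem.Chars.join ['\n'] (a :: ((b :: t') ++ [[]])) = _
      have hb : ∃ M, (b :: t') ++ [[]] = b :: M := ⟨t' ++ [[]], rfl⟩
      obtain ⟨M, hM⟩ := hb
      rw [hM, PySem.Chars.join_cons_cons, ← hM, ih (by simp), PySem.Chars.join_cons_cons]
      simp

theorem strip_join_seps (Qc : List (List Char)) (h : ∀ q ∈ Qc, goodC q) :
    PySem.Chars.strip (PySem.Chars.join ['\n'] (sepsC Qc))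
      = PySem.Chars.join ['\n', '\n'] Qc := by
  rcases Qc with _ | ⟨a, t⟩
  · rfl
  · rw [join_seps]
    exact good_strip_id (join_good _ _ (by simp) h)

theorem sepsC_ne_nil (a : List Char) (t : List (List Char)) : sepsC (a :: t) ≠ [] := by
  rcases t with _ | ⟨b, t'⟩ <;> simp [sepsC]

theorem strip_join_seps_blank (Qc : List (List Char)) (h : ∀ q ∈ Qc, goodC q) :
    PySem.Chars.strip (PySem.Chars.join ['\n'] (sepsC Qc ++ [[]]))
      = PySem.Chars.join ['\n', '\n'] Qc := by
  rcases Qc with _ | ⟨a, t⟩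
  · rfl
  · rw [join_concat_nil _ (sepsC_ne_nil a t), strip_concat_newline, strip_join_seps _ h]

-- string-level glue
theorem map_sepsS (P : List String) :
    (sepsS P).map String.toList = sepsC (P.map String.toList) := by
  induction P with
  | nil => rfl
  | cons a t ih =>
    rcases t with _ | ⟨b, t'⟩
    · rfl
    · show String.toList a :: "".toList :: (sepsS (b :: t')).map String.toList = _
      rw [ih]; rfl

theorem goodS_map {P : List String} (h : ∀ p ∈ P, goodS p) :
    ∀ q ∈ P.map String.toList, goodC q := by
  intro q hq
  obtain ⟨p, hp, rfl⟩ := List.mem_map.mp hq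
  exact h p hp

theorem good_ne_empty {s : String} (h : goodS s) : s ≠ "" := by
  intro e; subst e
  obtain ⟨⟨c, hc, _⟩, _⟩ := h
  simp at hc

theorem good_strip_idS {s : String} (h : goodS s) : PySem.Str.strip s = s := by
  apply String.toList_inj.mp
  rw [PySem.Str.toList_strip, good_strip_id h]

theorem strip_goodS {s : String} (h : PySem.Str.strip s ≠ "") : goodS (PySem.Str.strip s) := by
  have h1 : (PySem.Str.strip s).toList ≠ [] := by
    intro e; exact h (String.toList_eq_nil_iff.mp e)
  rw [PySem.Str.toList_strip] at h1
  rcases strip_good s.toList with h2 | h2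
  · exact absurd h2 h1
  · show goodC (PySem.Str.strip s).toList
    rw [PySem.Str.toList_strip]; exact h2

theorem good_joinS {cur : List String} (hne : cur ≠ []) (h : ∀ c ∈ cur, goodS c) :
    goodS (PySem.Str.join " " cur) := by
  show goodC (PySem.Str.join " " cur).toList
  rw [PySem.Str.toList_join]
  exact join_good _ _ (by simpa using hne) (goodS_map h)

theorem strip_join_sepsS (Q : List String) (h : ∀ q ∈ Q, goodS q) :
    PySem.Str.strip (PySem.Str.join "\n" (sepsS Q)) = PySem.Str.join "\n\n" Q := by
  apply String.toList_inj.mp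
  rw [PySem.Str.toList_strip, PySem.Str.toList_join, PySem.Str.toList_join, map_sepsS]
  exact strip_join_seps _ (goodS_map h)

theorem strip_join_interP (P : List String) (h : ∀ p ∈ P, goodS p) :
    PySem.Str.strip (PySem.Str.join "\n" (interP P)) = PySem.Str.join "\n\n" P := by
  rcases hP : P with _ | ⟨a, t⟩
  · rfl
  · apply String.toList_inj.mp
    rw [PySem.Str.toList_strip, PySem.Str.toList_join, PySem.Str.toList_join]
    show PySem.Chars.strip (PySem.Chars.join ['\n'] (((sepsS (a :: t)) ++ [""]).map String.toList)) = _
    rw [List.map_append, map_sepsS]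
    exact strip_join_seps_blank _ (goodS_map (hP ▸ h))

theorem sepsS_concat (P : List String) (x : String) :
    sepsS (P ++ [x]) = if P = [] then [x] else sepsS P ++ ["", x] := by
  induction P with
  | nil => rfl
  | cons a t ih =>
    rcases t with _ | ⟨b, t'⟩
    · rfl
    · show a :: "" :: sepsS ((b :: t') ++ [x]) = _
      rw [ih]
      simp [sepsS]

theorem interP_concat (P : List String) (x : String) :
    interP P ++ [x] = sepsS (P ++ [x]) := by
  rw [sepsS_concat]
  rcases P with _ | ⟨a, t⟩
  · rfl
  · simp [interP]

-- the loop invariant: A's remaining fold from state (interP P, cur) produces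
-- exactly the paragraphs P followed by B's continuation
theorem loop_inv (rest : List String) : ∀ (P cur : List String),
    (∀ p ∈ P, goodS p) → (∀ c ∈ cur, goodS c) →
    nbsFinish (rest.foldl nbsStep (interP P, cur))
      = PySem.Str.join "\n\n" (P ++ paraCont cur rest) := by
  induction rest with
  | nil =>
    intro P cur hP hcur
    simp only [List.foldl_nil]
    by_cases hc : cur = []
    · subst hc
      show PySem.Str.strip (PySem.Str.join "\n" (interP P)) = _
      rw [strip_join_interP P hP]
      simp [paraCont, nbsParagraphs]
    · have hgx : goodS (PySem.Str.join " " cur) := good_joinS hc hcur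
      show PySem.Str.strip (PySem.Str.join "\n"
          (if cur ≠ [] then interP P ++ [PySem.Str.strip (PySem.Str.join " " cur)] else interP P)) = _
      rw [if_pos hc, good_strip_idS hgx, interP_concat]
      rw [strip_join_sepsS (P ++ [PySem.Str.join " " cur]) ?hgood]
      case hgood =>
        intro q hq
        rcases List.mem_append.mp hq with h | h
        · exact hP q h
        · simp at h; subst h; exact hgx
      simp [paraCont, hc, nbsTakeRun, nbsParagraphs]
  | cons line rest' ih =>
    intro P cur hP hcur
    rw [List.foldl_cons]
    by_cases hs : PySem.Str.strip line = ""
    · by_cases hc : cur = []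
      · subst hc
        have hstep : nbsStep (interP P, []) line = (interP P, []) := by
          simp only [nbsStep, hs]
          rcases hPc : P with _ | ⟨a, t⟩
          · simp [interP, sepsS]
          · simp [interP]
        rw [hstep, ih P [] hP (by simp)]
        have : paraCont [] (line :: rest') = paraCont [] rest' := by
          simp [paraCont, nbsParagraphs, hs]
        rw [this]
      · have hgx : goodS (PySem.Str.join " " cur) := good_joinS hc hcur
        have hxne : PySem.Str.join " " cur ≠ "" := good_ne_empty hgx
        have hstep : nbsStep (interP P, cur) line
            = (interP (P ++ [PySem.Str.join " " cur]), []) := by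
          simp only [nbsStep]
          rw [if_neg (by simp [hs]), if_pos hc, good_strip_idS hgx]
          rw [if_pos ⟨by simp, by rw [List.getLast?_concat]; simpa using hxne⟩]
          rw [interP_concat]
          have hne : P ++ [PySem.Str.join " " cur] ≠ [] := by simp
          simp [interP]
        rw [hstep, ih (P ++ [PySem.Str.join " " cur]) [] ?hgood (by simp)]
        case hgood =>
          intro q hq
          rcases List.mem_append.mp hq with h | h
          · exact hP q h
          · simp at h; subst h; exact hgx
        have : paraCont cur (line :: rest')
            = PySem.Str.join " " cur :: paraCont [] rest' := by
          simp only [paraCont, if_neg hc, nbsTakeRun, if_neg (by simp [hs] : ¬ PySem.Str.strip line ≠ "")]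
          simp [nbsParagraphs, hs]
        rw [this]
        simp
    · have hstep : nbsStep (interP P, cur) line
          = (interP P, cur ++ [PySem.Str.strip line]) := by
        simp only [nbsStep]
        rw [if_pos hs]
      have hg : goodS (PySem.Str.strip line) := strip_goodS hs
      rw [hstep, ih P (cur ++ [PySem.Str.strip line]) hP ?hgood]
      case hgood =>
        intro q hq
        rcases List.mem_append.mp hq with h | h
        · exact hcur q h
        · simp at h; subst h; exact hg
      have : paraCont (cur ++ [PySem.Str.strip line]) rest' = paraCont cur (line :: rest') := by
        by_cases hc : cur = []
        · subst hc
          simp only [paraCont, List.nil_append, nbsParagraphs, if_pos hs]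
          simp
        · simp only [paraCont, if_neg hc, if_neg (by simp : ¬ cur ++ [PySem.Str.strip line] = []),
            nbsTakeRun, if_pos hs]
          simp only [List.append_assoc, List.singleton_append]
      rw [this]

-- ===== VERDICT (by name: the statement is the Claim_ definition above) =====
theorem normalize_block_scalar_spec : Claim_equal_normalize_block_scalar := by
  intro lines style _
  show normalize_block_scalar lines style = normalize_block_scalar_alt lines style
  unfold normalize_block_scalar normalize_block_scalar_alt
  by_cases h : PySem.Str.startswith style "|" = true
  · rw [if_pos h, if_pos h]
  · rw [if_neg h, if_neg h]
    have := loop_inv lines [] [] (by simp) (by simp)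
    simpa [interP, sepsS, paraCont] using this
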